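-- pv_equiv track=rewrite | github.com/elhostakosta/boot-dev | learn-python/loops/0d2e3863-67f1-4cbd-bd7f-24536c140a26/main.py | calculate_flurry_crit
-- ===== SOURCE A (Python) =====
-- def calculate_flurry_crit(num_attacks, base_damage):
--     total_damage = 0
--     for i in range (0, num_attacks):
--         if (i == num_attacks - 1):
--             total_damage += 4 * base_damage
--         else:
--             total_damage += base_damage * 2
--     return total_damage
-- ===== SOURCE B (Python) =====
-- def calculate_flurry_crit(num_attacks, base_damage):
--     if num_attacks < 1:
--         return 0
--     return base_damage * (2 * num_attacks + 2)
-- ===== Notes on version B (the rewrite author's own statement) =====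
-- stated objective: faster
-- what changed: Replaces the per-attack accumulation loop with the closed form base_damage*(2*num_attacks+2) guarded by num_attacks < 1 returning 0.
import Mathlib
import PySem

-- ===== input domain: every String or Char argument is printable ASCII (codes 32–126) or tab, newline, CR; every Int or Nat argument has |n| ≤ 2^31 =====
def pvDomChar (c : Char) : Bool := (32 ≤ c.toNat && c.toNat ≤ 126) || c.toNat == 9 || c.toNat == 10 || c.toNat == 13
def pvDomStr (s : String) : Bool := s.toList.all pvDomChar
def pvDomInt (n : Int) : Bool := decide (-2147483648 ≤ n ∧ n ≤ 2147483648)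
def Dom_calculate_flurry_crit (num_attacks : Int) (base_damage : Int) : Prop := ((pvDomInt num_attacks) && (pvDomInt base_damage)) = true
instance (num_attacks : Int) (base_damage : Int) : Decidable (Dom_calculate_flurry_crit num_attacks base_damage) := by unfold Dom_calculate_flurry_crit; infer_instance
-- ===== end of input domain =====

-- ===== PORT A =====
-- literal port of A: accumulate over range(0, num_attacks), last attack adds 4*base_damage
def calculate_flurry_crit (num_attacks : Int) (base_damage : Int) : Int :=
  (PySem.List.pyRange 0 num_attacks 1).foldl
    (fun total_damage i =>
      if i == num_attacks - 1 then total_damage + 4 * base_damage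
      else total_damage + base_damage * 2) 0

-- ===== PORT B =====
-- B: closed form, O(1) instead of the O(n) loop
def calculate_flurry_crit_alt (num_attacks : Int) (base_damage : Int) : Int :=
  if num_attacks < 1 then 0 else base_damage * (2 * num_attacks + 2)

-- ===== PRECONDITION & SPEC =====
def Spec_calculate_flurry_crit (num_attacks : Int) (base_damage : Int) (out : Int) : Prop := out = calculate_flurry_crit_alt num_attacks base_damage
instance (num_attacks : Int) (base_damage : Int) (out : Int) : Decidable (Spec_calculate_flurry_crit num_attacks base_damage out) := by unfold Spec_calculate_flurry_crit; infer_instance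

-- ===== CLAIM (what is proved, stated in full; the proofs are below) =====
def Claim_equal_calculate_flurry_crit : Prop := ∀ (num_attacks : Int) (base_damage : Int), Dom_calculate_flurry_crit num_attacks base_damage → Spec_calculate_flurry_crit num_attacks base_damage (calculate_flurry_crit num_attacks base_damage)

-- ===== LEMMAS AND PROOFS =====

-- ===== VERDICT (by name: the statement is the Claim_ definition above) =====
theorem calculate_flurry_crit_spec : Claim_equal_calculate_flurry_crit := by
  intro n b _
  unfold Spec_calculate_flurry_crit calculate_flurry_crit calculate_flurry_crit_alt
  by_cases hn : n < 1
  · rw [PySem.List.pyRange_one_eq_nil (by omega)]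
    simp [hn]
  · rw [if_neg hn]
    have hsplit : PySem.List.pyRange 0 n 1 = PySem.List.pyRange 0 (n - 1) 1 ++ [n - 1] := by
      have := PySem.List.pyRange_one_succ_right (a := 0) (b := n - 1) (by omega)
      simpa using this
    rw [hsplit, List.foldl_append]
    simp only [List.foldl_cons, List.foldl_nil, beq_self_eq_true, if_true]
    have hcongr : (PySem.List.pyRange 0 (n - 1) 1).foldl
        (fun total_damage i => if i == n - 1 then total_damage + 4 * b else total_damage + b * 2) 0
        = (PySem.List.pyRange 0 (n - 1) 1).foldl (fun acc _ => acc + b * 2) 0 := by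
      refine PySem.List.foldl_congr_mem _ _ _ _ ?_
      intro acc x hx
      have hxlt : x < n - 1 := (PySem.List.mem_pyRange_one.mp hx).2
      simp [show x ≠ n - 1 from by omega]
    rw [hcongr, PySem.List.foldl_add (g := fun _ => b * 2)]
    have hlen : ((PySem.List.pyRange 0 (n - 1) 1).map (fun _ => b * 2)).sum = (n - 1) * (b * 2) := by
      rw [List.map_const', List.sum_replicate, nsmul_eq_mul,
        PySem.List.length_pyRange_one]
      have : (((n - 1 - 0).toNat : Int)) = n - 1 := by omega
      rw [this]
    rw [hlen]
    ring
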